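-- pv_equiv track=rewrite | github.com/alya-mini/LLS | scent_ai/app.py | infer_profile
-- ===== SOURCE A (Python) =====
-- from typing import Dict, List
--
-- def infer_profile(colors: List[str]) -> str:
--     if not colors:
--         return "neutral"
--
--     warm_hits = sum(1 for c in colors if c.startswith(("#f", "#e", "#d", "#c")))
--     cool_hits = sum(1 for c in colors if c.startswith(("#0", "#1", "#2", "#3", "#4", "#5", "#6")))
--     if warm_hits > cool_hits:
--         return "warm"
--     if cool_hits > warm_hits:
--         return "cool"
--     return "neutral"
-- ===== SOURCE B (Python) =====
-- def _vote(c):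
--     # classify by the hex digit right after '#': 'c'-'f' warm, '0'-'6' cool
--     if len(c) >= 2 and c[0] == "#":
--         h = c[1]
--         if h in "cdef":
--             return 1
--         if h in "0123456":
--             return -1
--     return 0
--
--
-- def infer_profile(colors):
--     if not colors:
--         return "neutral"
--     # cancellation stack: opposite votes annihilate pairwise, so what survives
--     # is only the majority side (the stack always holds one kind of vote)
--     stack = []
--     for c in colors:
--         v = _vote(c)
--         if v == 0:
--             continue
--         if stack and stack[-1] != v:
--             stack.pop()
--         else:
--             stack.append(v)
--     if not stack:
--         return "neutral"
--     return "warm" if stack[-1] == 1 else "cool"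
-- ===== Notes on version B (the rewrite author's own statement) =====
-- stated objective: alternative
-- what changed: Replaced the two prefix-counting passes and count comparison with a Boyer-Moore-style cancellation stack: each color is classified by the single hex digit after '#' into a +1/-1 vote, opposite votes annihilate pairwise on a stack, and the surviving stack's vote kind (or emptiness) gives the verdict.
import Mathlib
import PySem

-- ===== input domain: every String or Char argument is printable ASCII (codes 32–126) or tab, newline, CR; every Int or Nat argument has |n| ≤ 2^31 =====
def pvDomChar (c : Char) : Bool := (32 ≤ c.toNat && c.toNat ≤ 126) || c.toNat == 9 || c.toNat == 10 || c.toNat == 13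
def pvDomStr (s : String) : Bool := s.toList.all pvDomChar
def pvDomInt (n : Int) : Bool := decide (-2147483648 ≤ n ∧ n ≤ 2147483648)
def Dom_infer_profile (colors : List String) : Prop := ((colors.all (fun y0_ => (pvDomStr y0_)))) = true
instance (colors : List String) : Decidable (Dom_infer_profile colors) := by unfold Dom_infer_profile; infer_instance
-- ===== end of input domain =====

-- B replaces A's two prefix-counting passes and count comparison by a single pass over ±1 votes
-- with a cancellation stack (alternative decomposition, same cost).

-- ===== PORT A =====
def pvWarm (c : String) : Bool :=
  (["#f", "#e", "#d", "#c"]).any (fun p => PySem.Str.startswith c p)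

def pvCool (c : String) : Bool :=
  (["#0", "#1", "#2", "#3", "#4", "#5", "#6"]).any (fun p => PySem.Str.startswith c p)

def infer_profile (colors : List String) : String :=
  if colors = [] then "neutral"
  else
    let warm_hits : Int := colors.foldl (fun acc c => if pvWarm c then acc + 1 else acc) 0
    let cool_hits : Int := colors.foldl (fun acc c => if pvCool c then acc + 1 else acc) 0
    if warm_hits > cool_hits then "warm"
    else if cool_hits > warm_hits then "cool"
    else "neutral"

-- ===== PORT B =====
-- _vote: `len(c) >= 2 and c[0] == '#'` with the second character tested is exactly the
-- pattern '#' :: h :: _ on the string's character list (exact on all strings).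
def pvVote (c : String) : Int :=
  match c.toList with
  | '#' :: h :: _ =>
      if h ∈ ['c', 'd', 'e', 'f'] then 1
      else if h ∈ ['0', '1', '2', '3', '4', '5', '6'] then -1
      else 0
  | _ => 0

-- the loop body; Python's list with append/pop at the END is modelled with the top at the HEAD
def pvStep (st : List Int) (c : String) : List Int :=
  let v := pvVote c
  if v = 0 then st
  else
    match st with
    | t :: ts => if t ≠ v then ts else v :: t :: ts
    | [] => [v]

def infer_profile_alt (colors : List String) : String :=
  if colors = [] then "neutral"
  else
    let stack := colors.foldl pvStep ([] : List Int)
    match stack with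
    | [] => "neutral"
    | t :: _ => if t = 1 then "warm" else "cool"

-- ===== PRECONDITION & SPEC =====
def Spec_infer_profile (colors : List String) (out : String) : Prop := out = infer_profile_alt colors
instance (colors : List String) (out : String) : Decidable (Spec_infer_profile colors out) := by unfold Spec_infer_profile; infer_instance

-- ===== CLAIM =====
def Claim_equal_infer_profile : Prop := ∀ (colors : List String), Dom_infer_profile colors → Spec_infer_profile colors (infer_profile colors)

-- ===== LEMMAS AND PROOFS =====
-- canonical stack holding |d| copies of the sign of d
def pvStk (d : Int) : List Int :=
  if 0 ≤ d then List.replicate d.toNat 1 else List.replicate (-d).toNat (-1)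

theorem pvWarm_iff (c : String) :
    pvWarm c = true ↔ ∃ h t, c.toList = '#' :: h :: t ∧ h ∈ ['c', 'd', 'e', 'f'] := by
  unfold pvWarm
  simp only [List.any_eq_true, List.mem_cons, List.not_mem_nil, or_false,
    PySem.Str.startswith_eq, PySem.Chars.startswith_iff]
  constructor
  · rintro ⟨p, hp, t, ht⟩
    rcases hp with rfl | rfl | rfl | rfl <;>
      exact ⟨_, t, by simpa using ht.symm, by simp⟩
  · rintro ⟨h, t, hc, hh⟩
    rcases hh with rfl | rfl | rfl | rfl
    · exact ⟨"#c", by simp, ⟨t, by simp [hc]⟩⟩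
    · exact ⟨"#d", by simp, ⟨t, by simp [hc]⟩⟩
    · exact ⟨"#e", by simp, ⟨t, by simp [hc]⟩⟩
    · exact ⟨"#f", by simp, ⟨t, by simp [hc]⟩⟩

theorem pvCool_iff (c : String) :
    pvCool c = true ↔ ∃ h t, c.toList = '#' :: h :: t ∧ h ∈ ['0', '1', '2', '3', '4', '5', '6'] := by
  unfold pvCool
  simp only [List.any_eq_true, List.mem_cons, List.not_mem_nil, or_false,
    PySem.Str.startswith_eq, PySem.Chars.startswith_iff]
  constructor
  · rintro ⟨p, hp, t, ht⟩
    rcases hp with rfl | rfl | rfl | rfl | rfl | rfl | rfl <;>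
      exact ⟨_, t, by simpa using ht.symm, by simp⟩
  · rintro ⟨h, t, hc, hh⟩
    rcases hh with rfl | rfl | rfl | rfl | rfl | rfl | rfl
    · exact ⟨"#0", by simp, ⟨t, by simp [hc]⟩⟩
    · exact ⟨"#1", by simp, ⟨t, by simp [hc]⟩⟩
    · exact ⟨"#2", by simp, ⟨t, by simp [hc]⟩⟩
    · exact ⟨"#3", by simp, ⟨t, by simp [hc]⟩⟩
    · exact ⟨"#4", by simp, ⟨t, by simp [hc]⟩⟩
    · exact ⟨"#5", by simp, ⟨t, by simp [hc]⟩⟩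
    · exact ⟨"#6", by simp, ⟨t, by simp [hc]⟩⟩

theorem pvVote_eq (c : String) :
    pvVote c = if pvWarm c then 1 else if pvCool c then (-1 : Int) else 0 := by
  unfold pvVote
  rcases hl : c.toList with _ | ⟨a, _ | ⟨h, t⟩⟩
  · have hw : pvWarm c = false := by
      rw [Bool.eq_false_iff]; intro h; rw [pvWarm_iff] at h
      obtain ⟨_, _, hc, _⟩ := h; rw [hl] at hc; simp at hc
    have hc' : pvCool c = false := by
      rw [Bool.eq_false_iff]; intro h; rw [pvCool_iff] at h
      obtain ⟨_, _, hc, _⟩ := h; rw [hl] at hc; simp at hc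
    simp [hw, hc']
  · have hw : pvWarm c = false := by
      rw [Bool.eq_false_iff]; intro h; rw [pvWarm_iff] at h
      obtain ⟨_, _, hc, _⟩ := h; rw [hl] at hc; simp at hc
    have hc' : pvCool c = false := by
      rw [Bool.eq_false_iff]; intro h; rw [pvCool_iff] at h
      obtain ⟨_, _, hc, _⟩ := h; rw [hl] at hc; simp at hc
    simp [hw, hc']
  · by_cases ha : a = '#'
    · subst ha
      by_cases hwm : h ∈ ['c', 'd', 'e', 'f']
      · have hw : pvWarm c = true := (pvWarm_iff c).2 ⟨h, t, hl, hwm⟩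
        simp [hw, hwm]
      · by_cases hcm : h ∈ ['0', '1', '2', '3', '4', '5', '6']
        · have hcc : pvCool c = true := (pvCool_iff c).2 ⟨h, t, hl, hcm⟩
          have hw : pvWarm c = false := by
            rw [Bool.eq_false_iff]; intro hx; rw [pvWarm_iff] at hx
            obtain ⟨h', t', hc, hm⟩ := hx; rw [hl] at hc
            injection hc with _ hc2; injection hc2 with hh _
            exact hwm (hh ▸ hm)
          simp [hw, hcc, hwm, hcm]
        · have hw : pvWarm c = false := by
            rw [Bool.eq_false_iff]; intro hx; rw [pvWarm_iff] at hx
            obtain ⟨h', t', hc, hm⟩ := hx; rw [hl] at hc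
            injection hc with _ hc2; injection hc2 with hh _
            exact hwm (hh ▸ hm)
          have hcl : pvCool c = false := by
            rw [Bool.eq_false_iff]; intro hx; rw [pvCool_iff] at hx
            obtain ⟨h', t', hc, hm⟩ := hx; rw [hl] at hc
            injection hc with _ hc2; injection hc2 with hh _
            exact hcm (hh ▸ hm)
          simp [hw, hcl, hwm, hcm]
    · have hw : pvWarm c = false := by
        rw [Bool.eq_false_iff]; intro hx; rw [pvWarm_iff] at hx
        obtain ⟨_, _, hc, _⟩ := hx; rw [hl] at hc
        injection hc with h1 _; exact ha h1
      have hcl : pvCool c = false := by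
        rw [Bool.eq_false_iff]; intro hx; rw [pvCool_iff] at hx
        obtain ⟨_, _, hc, _⟩ := hx; rw [hl] at hc
        injection hc with h1 _; exact ha h1
      simp [hw, hcl, ha]

theorem pvStep_stk (d : Int) (c : String) :
    pvStep (pvStk d) c = pvStk (d + pvVote c) := by
  unfold pvStep pvStk
  rw [pvVote_eq]
  by_cases hw : pvWarm c = true
  · -- v = 1
    simp only [hw, if_true]
    by_cases hd : 0 ≤ d
    · rcases Int.lt_or_le 0 d with hpos | hz
      · have h1 : d.toNat = (d.toNat - 1) + 1 := by omega
        simp only [hd, if_true]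
        rw [h1, List.replicate_succ]
        have : (0:Int) ≤ d + 1 := by omega
        simp only [this, if_true]
        have h2 : (d+1).toNat = (d.toNat - 1) + 1 + 1 := by omega
        rw [h2]
        simp [List.replicate_succ]
      · have hd0 : d = 0 := le_antisymm hz hd
        subst hd0; simp [List.replicate_succ]
    · -- d < 0, stack of -1's, pop
      have hk : (-d).toNat = ((-d).toNat - 1) + 1 := by omega
      simp only [hd, if_false]
      rw [hk, List.replicate_succ]
      by_cases hd1 : 0 ≤ d + 1
      · have : d + 1 = 0 := by omega
        simp [this, show ((-1:Int) ≠ 1) by decide, show ((-d).toNat - 1) = 0 by omega]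
      · simp only [hd1, if_false]
        have h3 : (-(d+1)).toNat = (-d).toNat - 1 := by omega
        simp only [show ((-1:Int) ≠ 1) by decide, if_true, ne_eq, not_false_eq_true]
        rw [h3]
        norm_num
  · by_cases hc : pvCool c = true
    · -- v = -1
      simp only [hw, hc, if_true, Bool.false_eq_true, if_false]
      by_cases hd : 0 ≤ d
      · rcases Int.lt_or_le 0 d with hpos | hz
        · have hk : d.toNat = (d.toNat - 1) + 1 := by omega
          simp only [hd, if_true]
          rw [hk, List.replicate_succ]
          have hd1 : 0 ≤ d + -1 := by omega
          simp only [hd1, if_true]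
          have : (d + -1).toNat = d.toNat - 1 := by omega
          simp [this, show ((1:Int) ≠ -1) by decide]
        · have hd0 : d = 0 := le_antisymm hz hd
          subst hd0
          simp [List.replicate_succ]
      · -- d < 0: stack of -1's, top = -1 = v, append
        have hk : (-d).toNat = ((-d).toNat - 1) + 1 := by omega
        simp only [hd, if_false]
        rw [hk, List.replicate_succ]
        have hd1 : ¬ 0 ≤ d + -1 := by omega
        simp only [hd1, if_false]
        have h3 : (-(d + -1)).toNat = ((-d).toNat - 1) + 1 + 1 := by omega
        rw [h3]
        simp only [List.replicate_succ]
        norm_num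
    · simp [hw, hc]

theorem pvFold_stk (l : List String) (d : Int) :
    l.foldl pvStep (pvStk d)
      = pvStk (d + ((l.countP pvWarm : Int) - (l.countP pvCool : Int))) := by
  induction l generalizing d with
  | nil => simp
  | cons x xs ih =>
    rw [List.foldl_cons, pvStep_stk, ih, List.countP_cons, List.countP_cons, pvVote_eq]
    congr 1
    by_cases hw : pvWarm x = true
    · have hc : pvCool x = false := by
        rw [Bool.eq_false_iff]; intro hx
        rw [pvWarm_iff] at hw; rw [pvCool_iff] at hx
        obtain ⟨h, t, hcl, hm⟩ := hw
        obtain ⟨h', t', hcl', hm'⟩ := hx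
        rw [hcl] at hcl'
        injection hcl' with _ h2; injection h2 with hh _
        subst hh
        simp only [List.mem_cons, List.not_mem_nil, or_false] at hm hm'
        rcases hm with rfl | rfl | rfl | rfl <;> simp at hm'
      simp [hw, hc]
      push_cast
      ring
    · by_cases hc : pvCool x = true <;> simp [hw, hc] <;> push_cast <;> ring

theorem count_fold (W : String → Bool) (l : List String) (a : Int) :
    l.foldl (fun acc c => if W c then acc + 1 else acc) a = a + (l.countP W : Int) := by
  induction l generalizing a with
  | nil => simp
  | cons x xs ih =>
    simp only [List.foldl_cons, List.countP_cons, ih]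
    by_cases h : W x = true <;> simp [h] <;> ring

theorem pvStk_verdict (d : Int) :
    (match pvStk d with
     | [] => "neutral"
     | t :: _ => if t = 1 then "warm" else "cool")
      = if d > 0 then "warm" else if d < 0 then "cool" else "neutral" := by
  unfold pvStk
  rcases lt_trichotomy d 0 with hneg | hz | hpos
  · have h1 : ¬ 0 ≤ d := by omega
    have h2 : (-d).toNat = ((-d).toNat - 1) + 1 := by omega
    rw [if_neg h1, h2, List.replicate_succ]
    simp [show ¬ d > 0 by omega, hneg, show ((-1:Int) ≠ 1) by decide]
  · subst hz; simp
  · have h2 : d.toNat = (d.toNat - 1) + 1 := by omega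
    rw [if_pos (by omega), h2, List.replicate_succ]
    simp [hpos]

-- ===== VERDICT =====
theorem infer_profile_spec : Claim_equal_infer_profile := by
  intro colors _
  unfold Spec_infer_profile infer_profile infer_profile_alt
  by_cases h : colors = []
  · simp [h]
  · simp only [h, if_false]
    have hfold : colors.foldl pvStep ([] : List Int)
        = pvStk ((colors.countP pvWarm : Int) - (colors.countP pvCool : Int)) := by
      have := pvFold_stk colors 0
      simpa [pvStk] using this
    rw [hfold, count_fold, count_fold, pvStk_verdict]
    split_ifs <;> first | rfl | omega
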